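-- pv_equiv track=rewrite | github.com/songjung-good/algorithm | SWEA/D2/16268. 풍선팡2/풍선팡2.py | max_flower
-- ===== SOURCE A (Python) =====
-- def max_flower(row, col, lst):
--     row_d = [0, 1, 0, -1]
--     col_d = [1, 0, -1, 0]
--     max_num = 0
--
--     for i in range(row):
--         for j in range(col):
--             sum_num = lst[i][j]
--             for k in range(4):
--                 ni = i + row_d[k]
--                 nj = j + col_d[k]
--                 if 0 <= ni < row and 0 <= nj < col:
--                     sum_num += lst[ni][nj]
--             if max_num < sum_num:
--                 max_num = sum_num
--
--     return max_num
-- ===== SOURCE B (Python) =====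
-- def max_flower(row, col, lst):
--     # Scatter instead of gather: each cell adds its value to itself and to its
--     # in-bounds orthogonal neighbours in an accumulator grid, then take the
--     # maximum of the grid and 0.
--     res = [[0] * col for _ in range(row)]
--     for i in range(row):
--         for j in range(col):
--             v = lst[i][j]
--             for di, dj in ((0, 0), (0, 1), (1, 0), (0, -1), (-1, 0)):
--                 ni = i + di
--                 nj = j + dj
--                 if 0 <= ni < row and 0 <= nj < col:
--                     res[ni][nj] += v
--     best = 0
--     for r in res:
--         for s in r:
--             if best < s:
--                 best = s
--     return best
-- ===== Notes on version B (the rewrite author's own statement) =====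
-- stated objective: alternative
-- what changed: Inverts A's per-cell gather (each cell reads its four neighbours) into a scatter pass: each cell adds its value into an accumulator grid at itself and its in-bounds neighbours, after which the answer is the maximum of the accumulator grid and 0; correct because the plus-shaped stencil is symmetric under negating the offsets.
import Mathlib
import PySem

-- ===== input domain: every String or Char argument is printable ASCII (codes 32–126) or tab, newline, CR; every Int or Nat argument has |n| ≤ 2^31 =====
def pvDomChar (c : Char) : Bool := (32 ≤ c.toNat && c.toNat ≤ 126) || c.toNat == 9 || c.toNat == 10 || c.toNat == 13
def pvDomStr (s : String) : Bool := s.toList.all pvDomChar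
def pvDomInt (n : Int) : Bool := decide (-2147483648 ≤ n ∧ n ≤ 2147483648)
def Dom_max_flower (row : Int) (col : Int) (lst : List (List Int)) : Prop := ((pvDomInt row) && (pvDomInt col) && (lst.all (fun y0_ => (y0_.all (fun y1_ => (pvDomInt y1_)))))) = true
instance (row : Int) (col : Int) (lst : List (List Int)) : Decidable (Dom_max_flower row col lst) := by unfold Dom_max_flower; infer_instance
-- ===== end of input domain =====

-- B inverts A's per-cell gather (each cell reads its four neighbours) into a scatter pass:
-- each cell adds its value into an accumulator grid at itself and its in-bounds neighbours,
-- then the answer is the maximum of the grid and 0 (alternative decomposition, same cost).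


-- ===== PORT A =====
def max_flower (row : Int) (col : Int) (lst : List (List Int)) : Int :=
  let row_d : List Int := [0, 1, 0, -1]
  let col_d : List Int := [1, 0, -1, 0]
  (PySem.List.pyRange 0 row 1).foldl (fun max_num i =>
    (PySem.List.pyRange 0 col 1).foldl (fun max_num j =>
      let sum_num :=
        (PySem.List.pyRange 0 4 1).foldl (fun sum_num k =>
          let ni := i + PySem.List.pyGetD row_d k 0
          let nj := j + PySem.List.pyGetD col_d k 0
          if 0 ≤ ni ∧ ni < row ∧ 0 ≤ nj ∧ nj < col then
            sum_num + PySem.List.pyGetD (PySem.List.pyGetD lst ni []) nj 0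
          else sum_num)
          (PySem.List.pyGetD (PySem.List.pyGetD lst i []) j 0)
      if max_num < sum_num then sum_num else max_num) max_num) 0

-- ===== PORT B =====
-- res[ni][nj] += v : both indices are guarded 0 ≤ · < len before use, so pySetD/pyGetD are exact
def updB (res : List (List Int)) (ni nj v : Int) : List (List Int) :=
  PySem.List.pySetD res ni
    (PySem.List.pySetD (PySem.List.pyGetD res ni [])
      nj (PySem.List.pyGetD (PySem.List.pyGetD res ni []) nj 0 + v))

def offsB : List (Int × Int) := [(0, 0), (0, 1), (1, 0), (0, -1), (-1, 0)]

-- the inner `for di, dj in …` loop: scatter lst[i][j] onto the in-bounds plus stencil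
def scatterB (row col : Int) (lst : List (List Int)) (res : List (List Int)) (i j : Int) : List (List Int) :=
  let v := PySem.List.pyGetD (PySem.List.pyGetD lst i []) j 0
  offsB.foldl (fun res d =>
    let ni := i + d.1
    let nj := j + d.2
    if 0 ≤ ni ∧ ni < row ∧ 0 ≤ nj ∧ nj < col then updB res ni nj v else res) res

def max_flower_alt (row : Int) (col : Int) (lst : List (List Int)) : Int :=
  let res0 := (PySem.List.pyRange 0 row 1).map (fun _ => (PySem.List.pyRange 0 col 1).map (fun _ => (0 : Int)))
  let res := (PySem.List.pyRange 0 row 1).foldl (fun res i =>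
      (PySem.List.pyRange 0 col 1).foldl (fun res j => scatterB row col lst res i j) res) res0
  res.foldl (fun best r => r.foldl (fun best s => if best < s then s else best) best) 0

-- ===== PRECONDITION & SPEC =====
-- Pre_ excludes exactly the inputs where A raises IndexError: when both loops run
-- (0 < row and 0 < col), A indexes lst[i] for every i < row and lst[i][j] for every j < col.
def Pre_max_flower (row : Int) (col : Int) (lst : List (List Int)) : Prop :=
  0 < row → 0 < col →
    row ≤ (lst.length : Int) ∧ ∀ r ∈ lst.take row.toNat, col ≤ (r.length : Int)
instance (row : Int) (col : Int) (lst : List (List Int)) : Decidable (Pre_max_flower row col lst) := by unfold Pre_max_flower; infer_instance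

def pvWitness_max_flower : Int × Int × List (List Int) := (2, 2, [[1, 2], [3, 4]])

def Spec_max_flower (row : Int) (col : Int) (lst : List (List Int)) (out : Int) : Prop := out = max_flower_alt row col lst
instance (row : Int) (col : Int) (lst : List (List Int)) (out : Int) : Decidable (Spec_max_flower row col lst out) := by unfold Spec_max_flower; infer_instance

-- ===== CLAIM (what is proved, stated in full; the proofs are below) =====
def Claim_equal_max_flower : Prop := ∀ (row : Int) (col : Int) (lst : List (List Int)), Dom_max_flower row col lst → Pre_max_flower row col lst → Spec_max_flower row col lst (max_flower row col lst)

-- ===== LEMMAS AND PROOFS =====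

-- the (defaulted) double indexing both ports use
def atIJ (lst : List (List Int)) (i j : Int) : Int :=
  PySem.List.pyGetD (PySem.List.pyGetD lst i []) j 0

-- A's per-cell gather: the value sum_num that A computes for cell (i, j)
def cellA (row col : Int) (lst : List (List Int)) (i j : Int) : Int :=
  (PySem.List.pyRange 0 4 1).foldl (fun sum_num k =>
    let ni := i + PySem.List.pyGetD [(0 : Int), 1, 0, -1] k 0
    let nj := j + PySem.List.pyGetD [(1 : Int), 0, -1, 0] k 0
    if 0 ≤ ni ∧ ni < row ∧ 0 ≤ nj ∧ nj < col then
      sum_num + PySem.List.pyGetD (PySem.List.pyGetD lst ni []) nj 0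
    else sum_num)
    (PySem.List.pyGetD (PySem.List.pyGetD lst i []) j 0)

lemma cellA_eq (row col : Int) (lst : List (List Int)) (i j : Int) :
    cellA row col lst i j =
      atIJ lst i j
      + (if 0 ≤ i ∧ i < row ∧ 0 ≤ j + 1 ∧ j + 1 < col then atIJ lst i (j + 1) else 0)
      + (if 0 ≤ i + 1 ∧ i + 1 < row ∧ 0 ≤ j ∧ j < col then atIJ lst (i + 1) j else 0)
      + (if 0 ≤ i ∧ i < row ∧ 0 ≤ j - 1 ∧ j - 1 < col then atIJ lst i (j - 1) else 0)
      + (if 0 ≤ i - 1 ∧ i - 1 < row ∧ 0 ≤ j ∧ j < col then atIJ lst (i - 1) j else 0) := by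
  unfold cellA atIJ
  simp only [show PySem.List.pyRange 0 4 1 = [0,1,2,3] from by decide,
    List.foldl_cons, List.foldl_nil,
    show PySem.List.pyGetD [(0:Int),1,0,-1] 0 0 = 0 from by decide,
    show PySem.List.pyGetD [(0:Int),1,0,-1] 1 0 = 1 from by decide,
    show PySem.List.pyGetD [(0:Int),1,0,-1] 2 0 = 0 from by decide,
    show PySem.List.pyGetD [(0:Int),1,0,-1] 3 0 = -1 from by decide,
    show PySem.List.pyGetD [(1:Int),0,-1,0] 0 0 = 1 from by decide,
    show PySem.List.pyGetD [(1:Int),0,-1,0] 1 0 = 0 from by decide,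
    show PySem.List.pyGetD [(1:Int),0,-1,0] 2 0 = -1 from by decide,
    show PySem.List.pyGetD [(1:Int),0,-1,0] 3 0 = 0 from by decide,
    add_zero]
  simp only [show ∀ x : Int, x + -1 = x - 1 from fun x => by ring]
  split_ifs <;> ring

-- the accumulator grid, read pointwise, and its shape invariant
def at2 (res : List (List Int)) (a b : Nat) : Int := (res.getD a []).getD b 0

def ShapeB (R C : Nat) (res : List (List Int)) : Prop :=
  res.length = R ∧ ∀ r ∈ res, r.length = C

-- one contribution of cell (i,j) through one offset, received at (a,b)
def termB (row col : Int) (lst : List (List Int)) (a b : Nat) (d1 d2 : Int) (i j : Int) : Int :=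
  if 0 ≤ i + d1 ∧ i + d1 < row ∧ 0 ≤ j + d2 ∧ j + d2 < col ∧ (a : Int) = i + d1 ∧ (b : Int) = j + d2
  then atIJ lst i j else 0

-- total contribution of cell (i,j) to position (a,b) (one term per offset of offsB)
def contribB (row col : Int) (lst : List (List Int)) (i j : Int) (a b : Nat) : Int :=
  (offsB.map (fun d => termB row col lst a b d.1 d.2 i j)).sum


-- getD after a single in-range set
lemma getD_set_if (l : List Int) (m : Nat) (x : Int) (a : Nat) (d : Int) (h : m < l.length) :
    (l.set m x).getD a d = if a = m then x else l.getD a d := by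
  rcases eq_or_ne a m with rfl | hne
  · simp [h]
  · simp [List.getD, List.getElem?_set_ne (Ne.symm hne), hne]

lemma getD_set_if' (l : List (List Int)) (m : Nat) (x : List Int) (a : Nat) (h : m < l.length) :
    (l.set m x).getD a [] = if a = m then x else l.getD a [] := by
  rcases eq_or_ne a m with rfl | hne
  · simp [h]
  · simp [List.getD, List.getElem?_set_ne (Ne.symm hne), hne]

-- updB written with plain List.set (its indices are nonnegative and in range)
lemma updB_eq_set (R C : Nat) (res : List (List Int)) (hlen : res.length = R)
    (ni nj v : Int) (h1 : 0 ≤ ni) (h2 : ni < (R : Int)) (h3 : 0 ≤ nj) :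
    updB res ni nj v
      = res.set ni.toNat ((res.getD ni.toNat []).set nj.toNat
          ((res.getD ni.toNat []).getD nj.toNat 0 + v)) := by
  have hni : ni = ((ni.toNat : Nat) : Int) := by omega
  have hnj : nj = ((nj.toNat : Nat) : Int) := by omega
  have hrowm : PySem.List.pyGetD res ni [] = res.getD ni.toNat [] := by
    conv_lhs => rw [hni]
    rw [PySem.List.pyGetD_natCast]
  have hrownj : PySem.List.pyGetD (res.getD ni.toNat []) nj 0
      = (res.getD ni.toNat []).getD nj.toNat 0 := by
    conv_lhs => rw [hnj]
    rw [PySem.List.pyGetD_natCast]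
  rw [updB, hrowm, hrownj]
  conv_lhs => rw [hni, hnj]
  simp only [PySem.List.pySetD_natCast, Int.toNat_natCast]

lemma shape_updB (R C : Nat) (res : List (List Int)) (h : ShapeB R C res)
    (ni nj v : Int) (h1 : 0 ≤ ni) (h2 : ni < (R : Int)) (h3 : 0 ≤ nj) (h4 : nj < (C : Int)) :
    ShapeB R C (updB res ni nj v) := by
  obtain ⟨hlen, hrows⟩ := h
  rw [updB_eq_set R C res hlen ni nj v h1 h2 h3]
  constructor
  · rw [List.length_set]; exact hlen
  · intro r hr
    rcases List.mem_or_eq_of_mem_set hr with hr | rfl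
    · exact hrows _ hr
    · rw [List.length_set]
      refine hrows _ ?_
      rw [List.getD_eq_getElem _ _ (by omega : ni.toNat < res.length)]
      exact List.getElem_mem _

lemma at2_updB (R C : Nat) (res : List (List Int)) (h : ShapeB R C res)
    (ni nj v : Int) (h1 : 0 ≤ ni) (h2 : ni < (R : Int)) (h3 : 0 ≤ nj) (h4 : nj < (C : Int))
    (a b : Nat) (ha : a < R) (hb : b < C) :
    ShapeB R C (updB res ni nj v) ∧
      at2 (updB res ni nj v) a b
        = at2 res a b + (if (a : Int) = ni ∧ (b : Int) = nj then v else 0) := by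
  obtain ⟨hlen, hrows⟩ := h
  have hm : ni.toNat < R := by omega
  have hk : nj.toNat < C := by omega
  have hmem : res.getD ni.toNat [] ∈ res := by
    rw [List.getD_eq_getElem _ _ (by omega : ni.toNat < res.length)]
    exact List.getElem_mem _
  have hrl : (res.getD ni.toNat []).length = C := hrows _ hmem
  refine ⟨shape_updB R C res ⟨hlen, hrows⟩ ni nj v h1 h2 h3 h4, ?_⟩
  rw [at2, at2, updB_eq_set R C res hlen ni nj v h1 h2 h3,
    getD_set_if' res ni.toNat _ a (by omega)]
  rcases eq_or_ne a ni.toNat with rfl | hne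
  · rw [if_pos rfl, getD_set_if _ nj.toNat _ b 0 (by omega)]
    rcases eq_or_ne b nj.toNat with rfl | hne2
    · rw [if_pos rfl, if_pos (by omega)]
    · rw [if_neg hne2, if_neg (by omega), add_zero]
  · rw [if_neg hne, if_neg (by omega), add_zero]

lemma shape_foldlB {A : Type} (R C : Nat)
    (f : List (List Int) → A → List (List Int)) (l : List A)
    (hstep : ∀ res x, x ∈ l → ShapeB R C res → ShapeB R C (f res x)) :
    ∀ res, ShapeB R C res → ShapeB R C (l.foldl f res) := by
  induction l with
  | nil => intro res h; simpa using h
  | cons x xs ih =>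
    intro res h
    exact ih (fun r y hy hr => hstep r y (List.mem_cons_of_mem _ hy) hr) (f res x)
      (hstep res x (List.mem_cons_self) h)

lemma at2_foldlB {A : Type} (R C a b : Nat)
    (f : List (List Int) → A → List (List Int)) (g : A → Int) (l : List A)
    (hstep : ∀ res x, x ∈ l → ShapeB R C res →
      ShapeB R C (f res x) ∧ at2 (f res x) a b = at2 res a b + g x) :
    ∀ res, ShapeB R C res →
      ShapeB R C (l.foldl f res) ∧ at2 (l.foldl f res) a b = at2 res a b + (l.map g).sum := by
  induction l with
  | nil => intro res h; exact ⟨h, by simp⟩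
  | cons x xs ih =>
    intro res h
    obtain ⟨hs, he⟩ := hstep res x (List.mem_cons_self) h
    obtain ⟨hs2, he2⟩ := ih (fun r y hy hr => hstep r y (List.mem_cons_of_mem _ hy) hr) (f res x) hs
    refine ⟨hs2, ?_⟩
    simp only [List.foldl_cons, List.map_cons, List.sum_cons]
    rw [he2, he]; ring

lemma shape_scatterB (R C : Nat) (row col : Int) (hrow : row = (R : Int)) (hcol : col = (C : Int))
    (lst : List (List Int)) (res : List (List Int)) (h : ShapeB R C res) (i j : Int) :
    ShapeB R C (scatterB row col lst res i j) := by
  subst hrow; subst hcol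
  have hstep : ∀ (r : List (List Int)) (d : Int × Int), d ∈ offsB → ShapeB R C r →
      ShapeB R C ((fun res (d : Int × Int) =>
        if 0 ≤ i + d.1 ∧ i + d.1 < ((R : Nat) : Int) ∧ 0 ≤ j + d.2 ∧ j + d.2 < ((C : Nat) : Int) then
          updB res (i + d.1) (j + d.2) (PySem.List.pyGetD (PySem.List.pyGetD lst i []) j 0)
        else res) r d) := by
    intro r d _ hr
    simp only []
    by_cases hg : 0 ≤ i + d.1 ∧ i + d.1 < ((R : Nat) : Int) ∧ 0 ≤ j + d.2 ∧ j + d.2 < ((C : Nat) : Int)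
    · rw [if_pos hg]
      exact shape_updB R C r hr _ _ _ hg.1 hg.2.1 hg.2.2.1 hg.2.2.2
    · rw [if_neg hg]; exact hr
  exact shape_foldlB R C _ offsB hstep res h

lemma at2_scatterB (R C : Nat) (row col : Int) (hrow : row = (R : Int)) (hcol : col = (C : Int))
    (lst : List (List Int)) (res : List (List Int)) (h : ShapeB R C res) (i j : Int)
    (a b : Nat) (ha : a < R) (hb : b < C) :
    ShapeB R C (scatterB row col lst res i j) ∧
      at2 (scatterB row col lst res i j) a b = at2 res a b + contribB row col lst i j a b := by
  subst hrow; subst hcol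
  have hstep : ∀ (r : List (List Int)) (d : Int × Int), d ∈ offsB → ShapeB R C r →
      ShapeB R C ((fun res (d : Int × Int) =>
          if 0 ≤ i + d.1 ∧ i + d.1 < ((R : Nat) : Int) ∧ 0 ≤ j + d.2 ∧ j + d.2 < ((C : Nat) : Int) then
            updB res (i + d.1) (j + d.2) (PySem.List.pyGetD (PySem.List.pyGetD lst i []) j 0)
          else res) r d) ∧
        at2 ((fun res (d : Int × Int) =>
          if 0 ≤ i + d.1 ∧ i + d.1 < ((R : Nat) : Int) ∧ 0 ≤ j + d.2 ∧ j + d.2 < ((C : Nat) : Int) then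
            updB res (i + d.1) (j + d.2) (PySem.List.pyGetD (PySem.List.pyGetD lst i []) j 0)
          else res) r d) a b
          = at2 r a b + termB ((R : Nat) : Int) ((C : Nat) : Int) lst a b d.1 d.2 i j := by
    intro r d _ hr
    simp only []
    by_cases hg : 0 ≤ i + d.1 ∧ i + d.1 < ((R : Nat) : Int) ∧ 0 ≤ j + d.2 ∧ j + d.2 < ((C : Nat) : Int)
    · rw [if_pos hg]
      obtain ⟨hg1, hg2, hg3, hg4⟩ := hg
      have H2 := at2_updB R C r hr (i + d.1) (j + d.2)
        (PySem.List.pyGetD (PySem.List.pyGetD lst i []) j 0) hg1 hg2 hg3 hg4 a b ha hb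
      refine ⟨H2.1, ?_⟩
      rw [H2.2, termB]
      congr 1
      split_ifs <;> first | rfl | (exfalso; omega)
    · rw [if_neg hg]
      exact ⟨hr, by rw [termB, if_neg (by tauto), add_zero]⟩
  have H := at2_foldlB R C a b _ _ offsB hstep res h
  exact ⟨H.1, H.2⟩

lemma sum_ind_nat (m : Nat) (t : Int) (f : Int → Int) :
    ((List.range m).map (fun (k : Nat) => if (k : Int) = t then f (k : Int) else 0)).sum
      = if 0 ≤ t ∧ t < (m : Int) then f t else 0 := by
  induction m with
  | zero =>
    simp only [List.range_zero, List.map_nil, List.sum_nil]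
    rw [if_neg (by omega)]
  | succ m ih =>
    rw [List.range_succ, List.map_append, List.sum_append, ih]
    simp only [List.map_cons, List.map_nil, List.sum_cons, List.sum_nil, add_zero]
    by_cases hmt : (m : Int) = t
    · rw [if_neg (by omega), if_pos hmt, hmt, if_pos (by push_cast; omega), zero_add]
    · rw [if_neg hmt, add_zero]
      have hiff : (0 ≤ t ∧ t < (m : Int)) ↔ (0 ≤ t ∧ t < ((m + 1 : Nat) : Int)) := by
        push_cast; omega
      rw [if_congr hiff rfl rfl]

lemma sum_ind (n t : Int) (f : Int → Int) :
    ((PySem.List.pyRange 0 n 1).map (fun i => if i = t then f i else 0)).sum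
      = if 0 ≤ t ∧ t < n then f t else 0 := by
  by_cases hn : 0 ≤ n
  · rw [PySem.List.pyRange_one, List.map_map, Int.sub_zero]
    simp only [Function.comp_def, zero_add]
    rw [sum_ind_nat n.toNat t f]
    split_ifs <;> first | rfl | (exfalso; omega)
  · rw [PySem.List.pyRange_one_eq_nil (by omega)]
    simp only [List.map_nil, List.sum_nil]
    rw [if_neg (by omega)]

lemma sum_termB (row col : Int) (lst : List (List Int)) (a b : Nat)
    (ha : 0 ≤ (a : Int) ∧ (a : Int) < row) (hb : 0 ≤ (b : Int) ∧ (b : Int) < col) (d1 d2 : Int) :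
    ((PySem.List.pyRange 0 row 1).map (fun i =>
        ((PySem.List.pyRange 0 col 1).map (fun j => termB row col lst a b d1 d2 i j)).sum)).sum
      = if 0 ≤ (a : Int) - d1 ∧ (a : Int) - d1 < row ∧ 0 ≤ (b : Int) - d2 ∧ (b : Int) - d2 < col
        then atIJ lst ((a : Int) - d1) ((b : Int) - d2) else 0 := by
  have hfun : ∀ i j : Int, termB row col lst a b d1 d2 i j
      = if j = (b : Int) - d2 then (if i + d1 = (a : Int) then atIJ lst i j else 0) else 0 := by
    intro i j; rw [termB]
    split_ifs <;> first | rfl | (exfalso; omega)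
  have hinner : ∀ i : Int,
      ((PySem.List.pyRange 0 col 1).map (fun j => termB row col lst a b d1 d2 i j)).sum
        = if i = (a : Int) - d1
          then (if 0 ≤ (b : Int) - d2 ∧ (b : Int) - d2 < col then atIJ lst i ((b : Int) - d2) else 0)
          else 0 := by
    intro i
    simp only [hfun]
    rw [sum_ind col ((b : Int) - d2) (fun j => if i + d1 = (a : Int) then atIJ lst i j else 0)]
    split_ifs <;> first | rfl | (exfalso; omega)
  simp only [hinner]
  rw [sum_ind row ((a : Int) - d1)
    (fun i => if 0 ≤ (b : Int) - d2 ∧ (b : Int) - d2 < col then atIJ lst i ((b : Int) - d2) else 0)]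
  split_ifs <;> first | rfl | (exfalso; omega)

lemma sum_map_add5 (l : List Int) (f0 f1 f2 f3 f4 : Int → Int) :
    (l.map (fun x => f0 x + f1 x + f2 x + f3 x + f4 x)).sum
      = (l.map f0).sum + (l.map f1).sum + (l.map f2).sum + (l.map f3).sum + (l.map f4).sum := by
  induction l with
  | nil => simp
  | cons x xs ih => simp only [List.map_cons, List.sum_cons, ih]; ring

lemma sum_contribB (row col : Int) (lst : List (List Int)) (a b : Nat)
    (ha : 0 ≤ (a : Int) ∧ (a : Int) < row) (hb : 0 ≤ (b : Int) ∧ (b : Int) < col) :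
    ((PySem.List.pyRange 0 row 1).map (fun i =>
        ((PySem.List.pyRange 0 col 1).map (fun j => contribB row col lst i j a b)).sum)).sum
      = cellA row col lst (a : Int) (b : Int) := by
  have hexp : ∀ i j : Int, contribB row col lst i j a b
      = termB row col lst a b 0 0 i j + termB row col lst a b 0 1 i j
        + termB row col lst a b 1 0 i j + termB row col lst a b 0 (-1) i j
        + termB row col lst a b (-1) 0 i j := by
    intro i j
    simp only [contribB, offsB, List.map_cons, List.map_nil, List.sum_cons, List.sum_nil, add_zero]
    ring
  simp only [hexp]
  have hinner : ∀ i : Int,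
      ((PySem.List.pyRange 0 col 1).map (fun j =>
        termB row col lst a b 0 0 i j + termB row col lst a b 0 1 i j
        + termB row col lst a b 1 0 i j + termB row col lst a b 0 (-1) i j
        + termB row col lst a b (-1) 0 i j)).sum
      = ((PySem.List.pyRange 0 col 1).map (fun j => termB row col lst a b 0 0 i j)).sum
        + ((PySem.List.pyRange 0 col 1).map (fun j => termB row col lst a b 0 1 i j)).sum
        + ((PySem.List.pyRange 0 col 1).map (fun j => termB row col lst a b 1 0 i j)).sum
        + ((PySem.List.pyRange 0 col 1).map (fun j => termB row col lst a b 0 (-1) i j)).sum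
        + ((PySem.List.pyRange 0 col 1).map (fun j => termB row col lst a b (-1) 0 i j)).sum := by
    intro i
    exact sum_map_add5 _ _ _ _ _ _
  simp only [hinner]
  rw [sum_map_add5]
  rw [sum_termB row col lst a b ha hb 0 0, sum_termB row col lst a b ha hb 0 1,
    sum_termB row col lst a b ha hb 1 0, sum_termB row col lst a b ha hb 0 (-1),
    sum_termB row col lst a b ha hb (-1) 0]
  rw [cellA_eq]
  simp only [Int.sub_zero, Int.sub_neg]
  rw [if_pos ⟨ha.1, ha.2, hb.1, hb.2⟩]
  split_ifs <;> ring

lemma foldl_flatMapB {A B C : Type} (g : A → List B) (f : C → B → C) (l : List A) (init : C) :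
    (l.flatMap g).foldl f init = l.foldl (fun a x => (g x).foldl f a) init := by
  induction l generalizing init with
  | nil => rfl
  | cons x xs ih => simp [List.flatMap_cons, List.foldl_append, ih]

lemma getD_map_zero {A : Type} (L : List A) (b : Nat) :
    (L.map (fun _ => (0 : Int))).getD b 0 = 0 := by
  rcases Nat.lt_or_ge b L.length with h | h
  · rw [List.getD_eq_getElem _ _ (by simpa using h), List.getElem_map]
  · rw [List.getD_eq_default _ _ (by simpa using h)]

-- the scatter double loop, evaluated pointwise: it builds exactly A's gather grid
lemma resB_eq (R C : Nat) (row col : Int) (hrow : row = (R : Int)) (hcol : col = (C : Int))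
    (lst : List (List Int)) :
    (PySem.List.pyRange 0 row 1).foldl (fun res i =>
        (PySem.List.pyRange 0 col 1).foldl (fun res j => scatterB row col lst res i j) res)
      ((PySem.List.pyRange 0 row 1).map (fun _ => (PySem.List.pyRange 0 col 1).map (fun _ => (0 : Int))))
      = (PySem.List.pyRange 0 row 1).map (fun i =>
          (PySem.List.pyRange 0 col 1).map (fun j => cellA row col lst i j)) := by
  have hlenR : (PySem.List.pyRange 0 row 1).length = R := by
    rw [PySem.List.length_pyRange_one]; omega
  have hlenC : (PySem.List.pyRange 0 col 1).length = C := by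
    rw [PySem.List.length_pyRange_one]; omega
  set res0 := (PySem.List.pyRange 0 row 1).map (fun _ => (PySem.List.pyRange 0 col 1).map (fun _ => (0 : Int))) with hres0
  have hshape0 : ShapeB R C res0 := by
    constructor
    · rw [hres0, List.length_map, hlenR]
    · intro r hr
      rw [hres0] at hr
      obtain ⟨i, _, rfl⟩ := List.mem_map.mp hr
      rw [List.length_map, hlenC]
  have hat0 : ∀ a b : Nat, a < R → at2 res0 a b = 0 := by
    intro a b haR
    have h1 : res0.getD a [] = (PySem.List.pyRange 0 col 1).map (fun _ => (0 : Int)) := by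
      rw [hres0, List.getD_eq_getElem _ _ (by rw [List.length_map, hlenR]; omega),
        List.getElem_map]
    rw [at2, h1, getD_map_zero]
  set cells := (PySem.List.pyRange 0 row 1).flatMap
    (fun i => (PySem.List.pyRange 0 col 1).map (fun j => ((i : Int), j))) with hcells
  have hinnerfold : (fun (res : List (List Int)) (i : Int) =>
        ((PySem.List.pyRange 0 col 1).map (fun j => ((i : Int), j))).foldl
          (fun res c => scatterB row col lst res c.1 c.2) res)
      = (fun res i => (PySem.List.pyRange 0 col 1).foldl (fun res j => scatterB row col lst res i j) res) := by
    funext res i; rw [List.foldl_map]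
  have hfold : (PySem.List.pyRange 0 row 1).foldl (fun res i =>
        (PySem.List.pyRange 0 col 1).foldl (fun res j => scatterB row col lst res i j) res) res0
      = cells.foldl (fun res c => scatterB row col lst res c.1 c.2) res0 := by
    rw [hcells, foldl_flatMapB, hinnerfold]
  rw [hfold]
  set resF := cells.foldl (fun res c => scatterB row col lst res c.1 c.2) res0 with hresF
  have hshapeF : ShapeB R C resF := by
    rw [hresF]
    exact shape_foldlB R C _ cells
      (fun res c _ hres => shape_scatterB R C row col hrow hcol lst res hres c.1 c.2)
      res0 hshape0
  have hmain : ∀ (a b : Nat), a < R → b < C →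
      at2 resF a b = at2 res0 a b + (cells.map (fun c => contribB row col lst c.1 c.2 a b)).sum := by
    intro a b haR hbC
    exact (at2_foldlB R C a b (fun res c => scatterB row col lst res c.1 c.2)
      (fun c => contribB row col lst c.1 c.2 a b) cells
      (fun res c _ hres => at2_scatterB R C row col hrow hcol lst res hres c.1 c.2 a b haR hbC)
      res0 hshape0).2
  have hsum : ∀ (a b : Nat), a < R → b < C →
      (cells.map (fun c => contribB row col lst c.1 c.2 a b)).sum
        = cellA row col lst (a : Int) (b : Int) := by
    intro a b haR hbC
    rw [hcells, List.map_flatMap]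
    have hmm : ∀ i : Int, (((PySem.List.pyRange 0 col 1).map (fun j => ((i : Int), j))).map
          (fun c : Int × Int => contribB row col lst c.1 c.2 a b))
        = (PySem.List.pyRange 0 col 1).map (fun j => contribB row col lst i j a b) := by
      intro i; rw [List.map_map]; rfl
    simp only [hmm]
    rw [List.flatMap_def, List.sum_flatten, List.map_map]
    rw [show ((fun l : List Int => l.sum) ∘ fun i => (PySem.List.pyRange 0 col 1).map
        (fun j => contribB row col lst i j a b))
      = (fun i => ((PySem.List.pyRange 0 col 1).map (fun j => contribB row col lst i j a b)).sum)
      from rfl]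
    exact sum_contribB row col lst a b (by omega) (by omega)
  apply List.ext_getElem
  · rw [hshapeF.1, List.length_map, hlenR]
  · intro a h1 h2
    have haR : a < R := by rw [hshapeF.1] at h1; exact h1
    apply List.ext_getElem
    · simp only [List.getElem_map, List.length_map, hlenC]
      exact hshapeF.2 _ (List.getElem_mem _)
    · intro b hb1 hb2
      have hbC : b < C := by
        have := hshapeF.2 (resF[a]) (List.getElem_mem _)
        omega
      have hval := hmain a b haR hbC
      rw [hat0 a b haR, zero_add, hsum a b haR hbC] at hval
      rw [at2, List.getD_eq_getElem _ _ (by omega : a < resF.length),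
        List.getD_eq_getElem _ _ (by omega : b < resF[a].length)] at hval
      rw [hval]
      simp only [List.getElem_map, PySem.List.getElem_pyRange_one, zero_add]

lemma foldl_keepB {A B : Type} (l : List A) (a : B) : l.foldl (fun m _ => m) a = a := by
  induction l generalizing a with
  | nil => rfl
  | cons x xs ih => simp only [List.foldl_cons]; exact ih a

lemma degenerate_A (row col : Int) (lst : List (List Int)) (h : row ≤ 0 ∨ col ≤ 0) :
    max_flower row col lst = 0 := by
  by_cases hr : row ≤ 0
  · simp only [max_flower, PySem.List.pyRange_one_eq_nil (by omega : row ≤ (0 : Int)), List.foldl_nil]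
  · have hc : col ≤ 0 := by tauto
    simp only [max_flower, PySem.List.pyRange_one_eq_nil (by omega : col ≤ (0 : Int)), List.foldl_nil]
    exact foldl_keepB _ _

lemma degenerate_B (row col : Int) (lst : List (List Int)) (h : row ≤ 0 ∨ col ≤ 0) :
    max_flower_alt row col lst = 0 := by
  by_cases hr : row ≤ 0
  · simp only [max_flower_alt, PySem.List.pyRange_one_eq_nil (by omega : row ≤ (0 : Int)),
      List.map_nil, List.foldl_nil]
  · have hc : col ≤ 0 := by tauto
    simp only [max_flower_alt, PySem.List.pyRange_one_eq_nil (by omega : col ≤ (0 : Int)),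
      List.map_nil, List.foldl_nil]
    rw [foldl_keepB, List.foldl_map]
    simp only [List.foldl_nil]
    exact foldl_keepB _ _

-- ===== VERDICT (by name: the statement is the Claim_ definition above) =====
theorem max_flower_spec : Claim_equal_max_flower := by
  intro row col lst _hdom hpre
  unfold Spec_max_flower
  by_cases h : row ≤ 0 ∨ col ≤ 0
  · rw [degenerate_A row col lst h, degenerate_B row col lst h]
  · have hrow : 0 < row := by omega
    have hcol : 0 < col := by omega
    have hR : row = ((row.toNat : Nat) : Int) := by omega
    have hC : col = ((col.toNat : Nat) : Int) := by omega
    show max_flower row col lst = max_flower_alt row col lst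
    simp only [max_flower_alt]
    rw [resB_eq row.toNat col.toNat row col hR hC lst]
    rw [List.foldl_map]
    simp only [List.foldl_map]
    rfl
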